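-- pv_equiv track=rewrite | github.com/JungYeonHwi/Algorithm_Study | python/programmers_python/login success.py | solution
-- ===== SOURCE A (Python) =====
-- def solution(id_pw, db):
--     answer = "wrong pw"
--
--     idList = []
--     pwList = []
--
--     for i in range(len(db)) :
--         if (id_pw[0] == db[i][0]) : idList.append(i)
--         if (id_pw[1] == db[i][1]) : pwList.append(i)
--
--     if len(idList) == 0 : answer = "fail"
--     else :
--         for i in idList :
--             for j in pwList :
--                 if i == j : answer = "login"
--
--     return answer
-- ===== SOURCE B (Python) =====
-- def solution(id_pw, db):
--     id_found = False
--     for rec in db: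
--         if id_pw[0] == rec[0]:
--             if id_pw[1] == rec[1]:
--                 return "login"
--             id_found = True
--     return "wrong pw" if id_found else "fail"
-- ===== Notes on version B (the rewrite author's own statement) =====
-- stated objective: simpler
-- what changed: Replaces A's two index lists built by an index loop plus a nested index-intersection loop with a single direct scan over db that early-returns on a full match and tracks one boolean id_found.
import Mathlib
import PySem

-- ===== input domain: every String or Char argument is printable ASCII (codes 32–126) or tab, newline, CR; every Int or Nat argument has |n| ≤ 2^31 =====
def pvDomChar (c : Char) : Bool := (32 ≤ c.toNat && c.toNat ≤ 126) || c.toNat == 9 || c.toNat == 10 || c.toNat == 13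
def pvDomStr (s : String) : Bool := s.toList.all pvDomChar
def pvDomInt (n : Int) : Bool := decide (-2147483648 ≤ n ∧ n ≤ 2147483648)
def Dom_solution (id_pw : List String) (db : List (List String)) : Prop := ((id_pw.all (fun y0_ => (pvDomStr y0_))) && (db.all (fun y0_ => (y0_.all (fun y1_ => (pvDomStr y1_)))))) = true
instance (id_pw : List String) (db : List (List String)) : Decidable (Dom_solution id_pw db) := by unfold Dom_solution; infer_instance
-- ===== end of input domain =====

-- B replaces A's two index lists and nested index-intersection loop with one direct scan over db
-- that early-returns "login" and tracks a single boolean (objective: simpler).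

-- ===== PORT A =====
-- literal port of A: build idList/pwList by an index loop, then intersect by nested loops
def solution (id_pw : List String) (db : List (List String)) : String :=
  let p := (PySem.List.pyRange 0 (db.length : Int) 1).foldl
    (fun (st : List Int × List Int) i =>
      let row := PySem.List.pyGetD db i []
      let st1 := if PySem.List.pyGetD id_pw 0 "" = PySem.List.pyGetD row 0 ""
                 then (st.1 ++ [i], st.2) else st
      if PySem.List.pyGetD id_pw 1 "" = PySem.List.pyGetD row 1 ""
      then (st1.1, st1.2 ++ [i]) else st1)
    ([], [])
  if p.1.length = 0 then "fail"
  else p.1.foldl (fun ans i => p.2.foldl (fun a2 j => if i = j then "login" else a2) ans) "wrong pw"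

-- ===== PORT B =====
-- literal port of B: one scan with an id_found flag and early return on a full match
def solutionAltGo (id_pw : List String) : List (List String) → Bool → String
  | [], found => if found then "wrong pw" else "fail"
  | r :: rest, found =>
    if PySem.List.pyGetD id_pw 0 "" = PySem.List.pyGetD r 0 "" then
      if PySem.List.pyGetD id_pw 1 "" = PySem.List.pyGetD r 1 "" then "login"
      else solutionAltGo id_pw rest true
    else solutionAltGo id_pw rest found

def solution_alt (id_pw : List String) (db : List (List String)) : String :=
  solutionAltGo id_pw db false

-- ===== PRECONDITION & SPEC =====
-- Pre_ excludes exactly the inputs where the Python A raises IndexError: with a nonempty db,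
-- A indexes id_pw[0], id_pw[1] and row[0], row[1] of every row (with empty db A touches nothing).
def Pre_solution (id_pw : List String) (db : List (List String)) : Prop :=
  db = [] ∨ (2 ≤ id_pw.length ∧ ∀ r ∈ db, 2 ≤ r.length)
instance (id_pw : List String) (db : List (List String)) : Decidable (Pre_solution id_pw db) := by unfold Pre_solution; infer_instance

def pvWitness_solution : List String × List (List String) :=
  (["u", "p"], [["u", "q"], ["v", "p"]])

def Spec_solution (id_pw : List String) (db : List (List String)) (out : String) : Prop := out = solution_alt id_pw db
instance (id_pw : List String) (db : List (List String)) (out : String) : Decidable (Spec_solution id_pw db out) := by unfold Spec_solution; infer_instance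

-- ===== CLAIM (what is proved, stated in full; the proofs are below) =====
def Claim_equal_solution : Prop := ∀ (id_pw : List String) (db : List (List String)), Dom_solution id_pw db → Pre_solution id_pw db → Spec_solution id_pw db (solution id_pw db)

-- ===== LEMMAS AND PROOFS =====

-- inner loop of A: scan pwList for i, setting answer to "login" on a hit
theorem foldl_login_inner (i : Int) (l : List Int) (ans : String) :
    l.foldl (fun a2 j => if i = j then "login" else a2) ans
      = if i ∈ l then "login" else ans := by
  induction l generalizing ans with
  | nil => simp
  | cons x xs ih =>
    simp only [List.foldl_cons, ih, List.mem_cons]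
    by_cases hx : i = x <;> by_cases hm : i ∈ xs <;> simp [hx, hm]

-- outer loop of A: "login" iff some element of idList occurs in pwList
theorem foldl_login_outer (l pw : List Int) (ans : String) :
    l.foldl (fun a i => if i ∈ pw then "login" else a) ans
      = if ∃ i ∈ l, i ∈ pw then "login" else ans := by
  induction l generalizing ans with
  | nil => simp
  | cons x xs ih =>
    simp only [List.foldl_cons, ih]
    by_cases hx : x ∈ pw <;> by_cases hm : ∃ i ∈ xs, i ∈ pw <;> simp [hx, hm]

-- B's scan, characterised
theorem solutionAltGo_eq (id_pw : List String) (db : List (List String)) (found : Bool) :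
    solutionAltGo id_pw db found
      = if ∃ r ∈ db, PySem.List.pyGetD id_pw 0 "" = PySem.List.pyGetD r 0 ""
                   ∧ PySem.List.pyGetD id_pw 1 "" = PySem.List.pyGetD r 1 "" then "login"
        else if found = true ∨ ∃ r ∈ db, PySem.List.pyGetD id_pw 0 "" = PySem.List.pyGetD r 0 "" then "wrong pw"
        else "fail" := by
  induction db generalizing found with
  | nil => cases found <;> simp [solutionAltGo]
  | cons r rest ih =>
    simp only [solutionAltGo, ih, List.mem_cons]
    by_cases h0 : PySem.List.pyGetD id_pw 0 "" = PySem.List.pyGetD r 0 "" <;>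
      by_cases h1 : PySem.List.pyGetD id_pw 1 "" = PySem.List.pyGetD r 1 "" <;>
        cases found <;>
          simp [h0, h1]

-- ===== VERDICT (by name: the statement is the Claim_ definition above) =====
theorem solution_spec : Claim_equal_solution := by
  intro id_pw db _hDom _hPre
  unfold Spec_solution solution solution_alt
  rw [solutionAltGo_eq]
  set a0 := PySem.List.pyGetD id_pw 0 "" with ha0
  set a1 := PySem.List.pyGetD id_pw 1 "" with ha1
  -- split A's pair loop into two independent append-if loops
  have hbody : (PySem.List.pyRange 0 (db.length : Int) 1).foldl
      (fun (st : List Int × List Int) i =>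
        let row := PySem.List.pyGetD db i []
        let st1 := if a0 = PySem.List.pyGetD row 0 "" then (st.1 ++ [i], st.2) else st
        if a1 = PySem.List.pyGetD row 1 "" then (st1.1, st1.2 ++ [i]) else st1)
      ([], [])
      = ((PySem.List.pyRange 0 (db.length : Int) 1).filter
           (fun i => decide (a0 = PySem.List.pyGetD (PySem.List.pyGetD db i []) 0 "")),
         (PySem.List.pyRange 0 (db.length : Int) 1).filter
           (fun i => decide (a1 = PySem.List.pyGetD (PySem.List.pyGetD db i []) 1 ""))) := by
    rw [PySem.List.foldl_congr_mem
      (g := fun (st : List Int × List Int) i =>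
        ((if a0 = PySem.List.pyGetD (PySem.List.pyGetD db i []) 0 "" then st.1 ++ [i] else st.1),
         (if a1 = PySem.List.pyGetD (PySem.List.pyGetD db i []) 1 "" then st.2 ++ [i] else st.2)))]
    · rw [PySem.List.foldl_prod_mk
        (f := fun (s : List Int) i => if a0 = PySem.List.pyGetD (PySem.List.pyGetD db i []) 0 "" then s ++ [i] else s)
        (g := fun (s : List Int) i => if a1 = PySem.List.pyGetD (PySem.List.pyGetD db i []) 1 "" then s ++ [i] else s)]
      rw [PySem.List.foldl_append_ite_eq_filter, PySem.List.foldl_append_ite_eq_filter]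
      simp
    · intro acc x _
      dsimp only
      split_ifs <;> simp_all
  rw [hbody]
  -- membership in the filtered index lists
  have hmem : ∀ (P : Int → Prop) [DecidablePred P] (i : Int),
      (i ∈ (PySem.List.pyRange 0 (db.length : Int) 1).filter (fun j => decide (P j))) ↔
        (0 ≤ i ∧ i < (db.length : Int) ∧ P i) := by
    intro P _ i
    simp [List.mem_filter, PySem.List.mem_pyRange_one, and_assoc]
  by_cases hid : ∃ r ∈ db, a0 = PySem.List.pyGetD r 0 ""
  · -- idList nonempty
    have hne : ((PySem.List.pyRange 0 (db.length : Int) 1).filter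
        (fun i => decide (a0 = PySem.List.pyGetD (PySem.List.pyGetD db i []) 0 ""))).length ≠ 0 := by
      obtain ⟨r, hr, h0⟩ := hid
      obtain ⟨k, hk, hkr⟩ := List.getElem_of_mem hr
      have hm : (k : Int) ∈ (PySem.List.pyRange 0 (db.length : Int) 1).filter
          (fun i => decide (a0 = PySem.List.pyGetD (PySem.List.pyGetD db i []) 0 "")) := by
        refine (hmem _ _).2 ⟨by positivity, by exact_mod_cast hk, ?_⟩
        rw [PySem.List.pyGetD_natCast]
        simpa [List.getD, hkr, hk] using h0
      intro h
      rw [List.length_eq_zero_iff] at h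
      rw [h] at hm
      exact absurd hm (List.not_mem_nil)
    simp only [hne, foldl_login_inner]
    rw [foldl_login_outer]
    by_cases hboth : ∃ r ∈ db, a0 = PySem.List.pyGetD r 0 "" ∧ a1 = PySem.List.pyGetD r 1 ""
    · have : ∃ i ∈ (PySem.List.pyRange 0 (db.length : Int) 1).filter
          (fun i => decide (a0 = PySem.List.pyGetD (PySem.List.pyGetD db i []) 0 "")),
          i ∈ (PySem.List.pyRange 0 (db.length : Int) 1).filter
          (fun i => decide (a1 = PySem.List.pyGetD (PySem.List.pyGetD db i []) 1 "")) := by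
        obtain ⟨r, hr, h0, h1⟩ := hboth
        obtain ⟨k, hk, hkr⟩ := List.getElem_of_mem hr
        have hrow : PySem.List.pyGetD db (k : Int) [] = r := by
          rw [PySem.List.pyGetD_natCast]; simp [List.getD, hkr, hk]
        exact ⟨(k : Int), (hmem _ _).2 ⟨by positivity, by exact_mod_cast hk, by rw [hrow]; exact h0⟩,
               (hmem _ _).2 ⟨by positivity, by exact_mod_cast hk, by rw [hrow]; exact h1⟩⟩
      obtain ⟨i, hi0, hi1⟩ := this
      obtain ⟨hp1, hp2, hp3⟩ := (hmem _ _).1 hi0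
      obtain ⟨-, -, hp6⟩ := (hmem _ _).1 hi1
      simp [hboth]
      exact ⟨i, hp1, hp2, hp3, hp1, hp2, hp6⟩
    · have : ¬ ∃ i ∈ (PySem.List.pyRange 0 (db.length : Int) 1).filter
          (fun i => decide (a0 = PySem.List.pyGetD (PySem.List.pyGetD db i []) 0 "")),
          i ∈ (PySem.List.pyRange 0 (db.length : Int) 1).filter
          (fun i => decide (a1 = PySem.List.pyGetD (PySem.List.pyGetD db i []) 1 "")) := by
        rintro ⟨i, hi0, hi1⟩
        obtain ⟨hle, hlt, h0⟩ := (hmem _ _).1 hi0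
        obtain ⟨-, -, h1⟩ := (hmem _ _).1 hi1
        have hrow : PySem.List.pyGetD db i [] ∈ db := by
          have : i = ((i.toNat : Nat) : Int) := by omega
          rw [this, PySem.List.pyGetD_natCast]
          have hk : i.toNat < db.length := by omega
          simp [List.getD, hk, List.getElem_mem]
        exact hboth ⟨_, hrow, h0, h1⟩
      simp [hboth, hid]
      intro x hx1 hx2 h0 _ _ h1
      exact this ⟨x, (hmem _ _).2 ⟨hx1, hx2, h0⟩, (hmem _ _).2 ⟨hx1, hx2, h1⟩⟩
  · -- idList empty → "fail"; B also "fail"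
    have hz : ((PySem.List.pyRange 0 (db.length : Int) 1).filter
        (fun i => decide (a0 = PySem.List.pyGetD (PySem.List.pyGetD db i []) 0 ""))).length = 0 := by
      rw [List.length_eq_zero_iff, List.filter_eq_nil_iff]
      intro i hi
      rw [PySem.List.mem_pyRange_one] at hi
      simp only [decide_eq_true_eq]
      intro h0
      have hrow : PySem.List.pyGetD db i [] ∈ db := by
        have : i = ((i.toNat : Nat) : Int) := by omega
        rw [this, PySem.List.pyGetD_natCast]
        have hk : i.toNat < db.length := by omega
        simp [List.getD, hk, List.getElem_mem]
      exact hid ⟨_, hrow, h0⟩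
    have hnb : ¬ ∃ r ∈ db, a0 = PySem.List.pyGetD r 0 "" ∧ a1 = PySem.List.pyGetD r 1 "" := by
      rintro ⟨r, hr, h0, -⟩; exact hid ⟨r, hr, h0⟩
    simp [hz, hnb, hid]
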